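-- pv_equiv track=rewrite | github.com/envomp/2018-Introduction-to-Programming | kt2/exam.py | g_happy
-- ===== SOURCE A (Python) =====
-- def g_happy(s):
--     """
--     We'll say that a lowercase 'g' in a string is "happy" if there is another 'g' immediately to its left or right.
--
--     Return True if all the g's in the given string are happy.
--
--     g_happy("xxggxx") => True
--     g_happy("xxgxx") => False
--     g_happy("xxggyygxx") => False
--     """
--     for i in range(len(s)):
--         if s[i] == 'g':
--             if i > 0 and s[i - 1] == 'g':
--                 continue
--             if i < len(s) - 1 and s[i + 1] == 'g':
--                 continue
--             return False
--     return True
-- ===== SOURCE B (Python) =====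
-- def g_happy(s):
--     # Run-based scan: advance one maximal run of identical characters at a time;
--     # a lone 'g' run (length 1) makes the string unhappy.
--     i, n = 0, len(s)
--     while i < n:
--         j = i + 1
--         while j < n and s[j] == s[i]:
--             j += 1
--         if s[i] == 'g' and j - i == 1:
--             return False
--         i = j
--     return True
-- ===== Notes on version B (the rewrite author's own statement) =====
-- stated objective: alternative
-- what changed: B processes the string as maximal runs of identical characters (recursively stripping one run at a time and rejecting a lone 'g' run of length 1) instead of A's per-index left/right neighbour inspection.
import Mathlib
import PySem

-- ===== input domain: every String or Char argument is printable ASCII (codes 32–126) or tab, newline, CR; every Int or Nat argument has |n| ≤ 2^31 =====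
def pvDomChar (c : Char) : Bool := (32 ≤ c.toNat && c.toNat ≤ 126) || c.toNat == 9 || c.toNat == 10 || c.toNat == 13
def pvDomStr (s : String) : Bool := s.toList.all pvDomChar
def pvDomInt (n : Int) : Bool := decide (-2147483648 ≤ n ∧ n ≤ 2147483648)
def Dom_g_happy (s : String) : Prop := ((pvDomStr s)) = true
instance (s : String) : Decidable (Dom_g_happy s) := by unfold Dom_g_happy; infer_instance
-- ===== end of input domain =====

-- B is an alternative run-based scan (strip maximal runs, reject a lone 'g' run) versus A's per-index neighbour check; same return value everywhere.

-- ===== PORT A =====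
-- for i in range(len(s)): per-index scan with early return; every index used (i, i-1, i+1)
-- is guarded in range, so List.getD is exact for Python's s[...] here.
def gHappyGoA (l : List Char) (i : Nat) : Bool :=
  if i < l.length then
    (if l.getD i ' ' == 'g' then
      (if decide (0 < i) && (l.getD (i - 1) ' ' == 'g') then gHappyGoA l (i + 1)
       else if decide (i < l.length - 1) && (l.getD (i + 1) ' ' == 'g') then gHappyGoA l (i + 1)
       else false)
     else gHappyGoA l (i + 1))
  else true
termination_by l.length - i

def g_happy (s : String) : Bool := gHappyGoA s.toList 0

-- ===== PORT B =====
-- length of the leading run of character c (the inner while loop of Source B)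
def gHappyRunLen (c : Char) : List Char → Nat
  | [] => 0
  | x :: xs => if x == c then gHappyRunLen c xs + 1 else 0

theorem gHappyRunLen_le (c : Char) (l : List Char) : gHappyRunLen c l ≤ l.length := by
  induction l with
  | nil => simp [gHappyRunLen]
  | cons x xs ih =>
    by_cases h : x == c <;> simp [gHappyRunLen, h]
    omega

-- outer while loop of Source B ported as recursion on the remaining suffix:
-- measure one maximal run, reject a lone 'g' run, continue past it
def gHappyGoB : List Char → Bool
  | [] => true
  | c :: rest =>
    let run := 1 + gHappyRunLen c rest
    if c == 'g' && run == 1 then false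
    else gHappyGoB (rest.drop (run - 1))
termination_by l => l.length
decreasing_by
  have h1 := gHappyRunLen_le c rest
  simp only [List.length_drop, List.length_cons]
  omega

def g_happy_alt (s : String) : Bool := gHappyGoB s.toList

-- ===== PRECONDITION & SPEC =====
def Spec_g_happy (s : String) (out : Bool) : Prop := out = g_happy_alt s
instance (s : String) (out : Bool) : Decidable (Spec_g_happy s out) := by unfold Spec_g_happy; infer_instance

-- ===== CLAIM (what is proved, stated in full; the proofs are below) =====
def Claim_equal_g_happy : Prop := ∀ (s : String), Dom_g_happy s → Spec_g_happy s (g_happy s)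

-- ===== LEMMAS AND PROOFS =====

-- common reference predicate: scan with a flag "previous char was 'g'"
def gHappyF : Bool → List Char → Bool
  | _, [] => true
  | prev, c :: rest =>
    if c == 'g' then (prev || (rest.head? == some 'g')) && gHappyF true rest
    else gHappyF false rest

theorem gHappyF_nil (prev : Bool) : gHappyF prev [] = true := rfl

theorem gHappyF_cons (prev : Bool) (c : Char) (rest : List Char) :
    gHappyF prev (c :: rest) =
      if c == 'g' then (prev || (rest.head? == some 'g')) && gHappyF true rest
      else gHappyF false rest := rfl

theorem gHappyF_not_g (prev prev' : Bool) (l : List Char)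
    (h : l.head? ≠ some 'g') : gHappyF prev l = gHappyF prev' l := by
  cases l with
  | nil => rfl
  | cons c rest =>
    simp at h
    simp [gHappyF_cons, h]

-- skipping a maximal run of a non-'g' char does not change gHappyF false
theorem gHappyF_skip_run (c : Char) (hc : ¬ c == 'g') (l : List Char) :
    gHappyF false l = gHappyF false (l.drop (gHappyRunLen c l)) := by
  induction l with
  | nil => simp
  | cons x xs ih =>
    by_cases h : x == c
    · have hx : ¬ x == 'g' := by simp_all
      simp [gHappyRunLen, h, gHappyF_cons, hx, ih]
    · simp [gHappyRunLen, h]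

-- skipping a maximal run of 'g's: prev flag true across the run
theorem gHappyF_g_run (l : List Char) :
    gHappyF true l = gHappyF false (l.drop (gHappyRunLen 'g' l)) := by
  induction l with
  | nil => rfl
  | cons x xs ih =>
    by_cases h : x == 'g'
    · simp [gHappyRunLen, h, gHappyF_cons, ih]
    · simp [gHappyRunLen, h]
      exact gHappyF_not_g true false (x :: xs) (by simp; simpa using h)

theorem gHappyRunLen_zero_iff (l : List Char) :
    gHappyRunLen 'g' l = 0 ↔ l.head? ≠ some 'g' := by
  cases l with
  | nil => simp [gHappyRunLen]
  | cons x xs =>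
    by_cases h : x == 'g' <;> simp [gHappyRunLen, h] <;> simp_all

-- B equals the reference scan (fuel-indexed induction on the length)
theorem gHappyGoB_eq_aux (n : Nat) : ∀ l : List Char, l.length ≤ n →
    gHappyGoB l = gHappyF false l := by
  induction n with
  | zero =>
    intro l h
    have : l = [] := List.eq_nil_of_length_eq_zero (by omega)
    subst this
    rw [gHappyGoB]; rfl
  | succ n ih =>
    intro l h
    cases l with
    | nil => rw [gHappyGoB]; rfl
    | cons c rest =>
      rw [gHappyGoB]
      show (if c == 'g' && (1 + gHappyRunLen c rest) == 1 then false
            else gHappyGoB (rest.drop (1 + gHappyRunLen c rest - 1)))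
          = gHappyF false (c :: rest)
      by_cases hc : (c == 'g') = true
      · have hceq : c = 'g' := by simpa using hc
        by_cases h0 : gHappyRunLen c rest = 0
        · have hh : rest.head? ≠ some 'g' := by
            rw [← gHappyRunLen_zero_iff, ← hceq]
            exact h0
          have hcond : (c == 'g' && (1 + gHappyRunLen c rest) == 1) = true := by
            simp [hc, h0]
          rw [if_pos hcond]
          have hhd : (rest.head? == some 'g') = false := by simpa using hh
          simp [gHappyF_cons, hc, hhd]
        · have hcond : ¬ (c == 'g' && (1 + gHappyRunLen c rest) == 1) = true := by
            simp; intro _; omega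
          rw [if_neg hcond]
          have hle := gHappyRunLen_le c rest
          have hrec := ih (rest.drop (1 + gHappyRunLen c rest - 1))
            (by simp at h ⊢; omega)
          rw [hrec]
          have hdrop : 1 + gHappyRunLen c rest - 1 = gHappyRunLen 'g' rest := by
            rw [← hceq]; omega
          rw [hdrop, ← gHappyF_g_run]
          have hhead : (rest.head? == some 'g') = true := by
            by_contra hcon
            exact h0 (by
              rw [hceq]
              exact (gHappyRunLen_zero_iff rest).2 (by simpa using hcon))
          simp [gHappyF_cons, hc, hhead]
      · have hcond : ¬ (c == 'g' && (1 + gHappyRunLen c rest) == 1) = true := by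
          simp [hc]
        rw [if_neg hcond]
        have hle := gHappyRunLen_le c rest
        have hrec := ih (rest.drop (1 + gHappyRunLen c rest - 1))
          (by simp at h ⊢; omega)
        rw [hrec]
        have hdrop : 1 + gHappyRunLen c rest - 1 = gHappyRunLen c rest := by omega
        rw [hdrop, ← gHappyF_skip_run c (by simpa using hc) rest]
        simp [gHappyF_cons, hc]

-- head? of a drop, as a Bool test
theorem head_drop_eq (l : List Char) (i : Nat) :
    ((l.drop i).head? == some 'g') = (decide (i < l.length) && (l.getD i ' ' == 'g')) := by
  by_cases h : i < l.length
  · rw [List.drop_eq_getElem_cons h]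
    simp [h]
  · have hnil : l.drop i = [] := List.drop_eq_nil_of_le (by omega)
    simp [hnil, h]

-- A equals the reference scan
theorem gHappyGoA_eq (n : Nat) : ∀ (l : List Char) (i : Nat), l.length - i ≤ n →
    gHappyGoA l i = gHappyF (decide (0 < i) && (l.getD (i - 1) ' ' == 'g')) (l.drop i) := by
  induction n with
  | zero =>
    intro l i h
    have hge : l.length ≤ i := by omega
    rw [gHappyGoA, if_neg (by omega), List.drop_eq_nil_of_le hge, gHappyF_nil]
  | succ n ih =>
    intro l i h
    by_cases hi : i < l.length
    · have e1 : l.drop i = l.getD i ' ' :: l.drop (i + 1) := by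
        rw [List.drop_eq_getElem_cons hi, List.getD_eq_getElem _ _ hi]
      rw [gHappyGoA, if_pos hi, e1, gHappyF_cons]
      have ihnext := ih l (i + 1) (by omega)
      by_cases hc : (l.getD i ' ' == 'g') = true
      · have hprev1 : (decide (0 < i + 1) && (l.getD (i + 1 - 1) ' ' == 'g')) = true := by
          simp only [Nat.add_sub_cancel]
          simp
          simpa [List.getD] using hc
        rw [hprev1] at ihnext
        rw [if_pos hc, if_pos hc, head_drop_eq l (i + 1), ← ihnext,
          show decide (i < l.length - 1) = decide (i + 1 < l.length) from
            decide_eq_decide.mpr (by omega)]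
        by_cases hP : (decide (0 < i) && (l.getD (i - 1) ' ' == 'g')) = true
        · rw [if_pos hP, hP]
          simp
        · have hPf : (decide (0 < i) && (l.getD (i - 1) ' ' == 'g')) = false := by
            simpa using hP
          rw [if_neg hP, hPf, Bool.false_or]
          by_cases hN : (decide (i + 1 < l.length) && (l.getD (i + 1) ' ' == 'g')) = true
          · rw [if_pos hN, hN, Bool.true_and]
          · have hNf : (decide (i + 1 < l.length) && (l.getD (i + 1) ' ' == 'g')) = false := by
              simpa using hN
            rw [if_neg hN, hNf, Bool.false_and]
      · have hc' : (l.getD i ' ' == 'g') = false := by simpa using hc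
        have hprev0 : (decide (0 < i + 1) && (l.getD (i + 1 - 1) ' ' == 'g')) = false := by
          simp only [Nat.add_sub_cancel]
          simp
          simpa [List.getD] using hc' 
        rw [hprev0] at ihnext
        rw [if_neg hc, if_neg hc]
        exact ihnext
    · rw [gHappyGoA, if_neg hi, List.drop_eq_nil_of_le (by omega), gHappyF_nil]

-- ===== VERDICT (by name: the statement is the Claim_ definition above) =====
theorem g_happy_spec : Claim_equal_g_happy := by
  intro s _
  unfold Spec_g_happy g_happy g_happy_alt
  rw [gHappyGoB_eq_aux s.toList.length s.toList (le_refl _)]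
  have := gHappyGoA_eq s.toList.length s.toList 0 (by omega)
  simpa using this
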